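-- pv_equiv track=rewrite | github.com/saifsahed01/CSE221-Lab | Assignment 07.py | beautiful_path
-- ===== SOURCE A (Python) =====
-- import heapq
-- import heapq
-- import heapq
-- import heapq
--
-- def beautiful_path(N, M, S, D, node_weights, edges):
--     graph = {i: [] for i in range(1, N + 1)}
--     for u, v in edges:
--         graph[u].append(v)
--     cost = [float('inf')] * (N + 1)
--     cost[S] = node_weights[S - 1]
--     pq = [(node_weights[S - 1], S)]
--     while pq:
--         current_cost, u = heapq.heappop(pq)
--         if current_cost > cost[u]:
--             continue
--         for v in graph[u]:
--             new_cost = current_cost + node_weights[v - 1]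
--             if new_cost < cost[v]:
--                 cost[v] = new_cost
--                 heapq.heappush(pq, (new_cost, v))
--     return cost[D] if cost[D] != float('inf') else -1
-- ===== SOURCE B (Python) =====
-- def beautiful_path(N, M, S, D, node_weights, edges):
--     # Bellman-Ford style edge relaxation to a fixpoint: no heap, no best-first
--     # extraction; sweep the whole edge list until a sweep changes nothing.
--     cost = [None] * (N + 1)
--     cost[S] = node_weights[S - 1]
--     changed = True
--     while changed:
--         changed = False
--         for u, v in edges:
--             cu = cost[u]
--             if cu is None:
--                 continue
--             c = cu + node_weights[v - 1]
--             if cost[v] is None or c < cost[v]: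
--                 cost[v] = c
--                 changed = True
--     return cost[D] if cost[D] is not None else -1
-- ===== Notes on version B (the rewrite author's own statement) =====
-- stated objective: alternative
-- what changed: Replaces the heap-based best-first Dijkstra (priority queue with lazy deletion) by plain Bellman-Ford edge relaxation: sweep the whole edge list, updating cost[v] = min(cost[v], cost[u]+w[v]) from every finite cost[u], repeated until a sweep changes nothing; no heap, no adjacency dict.
-- outside the precondition, e.g. on beautiful_path(2, 1, 1, 2, [-1, -2], [(1, 2)]): A returns -3, B returns -3
import Mathlib
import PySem

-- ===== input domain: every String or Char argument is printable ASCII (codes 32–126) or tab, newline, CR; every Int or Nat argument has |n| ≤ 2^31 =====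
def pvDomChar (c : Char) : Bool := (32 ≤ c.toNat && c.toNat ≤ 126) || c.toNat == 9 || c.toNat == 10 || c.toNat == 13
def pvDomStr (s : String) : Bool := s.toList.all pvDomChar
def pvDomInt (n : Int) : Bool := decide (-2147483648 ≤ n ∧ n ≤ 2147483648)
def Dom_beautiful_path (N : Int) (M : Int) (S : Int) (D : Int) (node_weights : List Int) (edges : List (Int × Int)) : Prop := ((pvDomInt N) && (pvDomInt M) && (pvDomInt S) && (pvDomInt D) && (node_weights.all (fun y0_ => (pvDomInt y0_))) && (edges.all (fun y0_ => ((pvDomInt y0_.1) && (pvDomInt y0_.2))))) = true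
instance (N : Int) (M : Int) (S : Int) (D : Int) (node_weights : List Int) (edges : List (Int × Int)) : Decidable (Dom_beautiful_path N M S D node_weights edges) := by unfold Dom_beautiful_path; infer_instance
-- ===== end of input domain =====

-- B replaces the heap-based best-first Dijkstra by Bellman-Ford edge-relaxation
-- sweeps repeated until a sweep changes nothing (objective: alternative algorithm).

-- ===== PORT A =====
-- Python's float('inf') entries of `cost` are modelled as `none` (exact: inf is
-- strictly greater than every int, and cost entries are otherwise ints).
-- `new_cost < cost[v]` with cost[v] possibly inf:
def pvLtCost (c : Int) (o : Option Int) : Bool :=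
  match o with
  | none => true
  | some y => decide (c < y)

-- `current_cost > cost[u]` with cost[u] possibly inf:
def pvGtCost (c : Int) (o : Option Int) : Bool :=
  match o with
  | none => false
  | some y => decide (y < c)

-- heapq modelled as the list of pending (cost, node) pairs: heappush appends,
-- heappop removes the lexicographically least pair.  Exact for this program:
-- heappop returns the minimum (cost, node) tuple and equal tuples are
-- indistinguishable, so the sequence of popped values is the same.
def pvLexPop (pq : List (Int × Int)) : Option ((Int × Int) × List (Int × Int)) :=
  match pq with
  | [] => none
  | x :: xs =>
    let m := xs.foldl (fun a b => if b.1 < a.1 ∨ (b.1 = a.1 ∧ b.2 < a.2) then b else a) x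
    some (m, (x :: xs).erase m)

-- fuel for the while-loop (the loop is proved to exit via an empty queue
-- within this bound whenever Pre_ holds; outside Pre_ nothing is claimed)
def pvFuelA (N : Int) : Nat := (N.toNat + 2) * (N.toNat * 2147483648 + 2147483648 + 2) + 5

-- the body of `for v in graph[u]:`
def pvStepA (nw : List Int) (c : Int) (s : List (Int × Int) × List (Option Int)) (v : Int) :
    List (Int × Int) × List (Option Int) :=
  let nc := c + nw.getD (v - 1).toNat 0
  if pvLtCost nc (s.2.getD v.toNat none) then (s.1 ++ [(nc, v)], s.2.set v.toNat (some nc))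
  else s

def pvDijkstraLoop (nw : List Int) (graph : PySem.Dict Int (List Int)) :
    Nat → List (Int × Int) → List (Option Int) → List (Option Int)
  | 0, _, cost => cost
  | fuel + 1, pq, cost =>
    match pvLexPop pq with
    | none => cost
    | some ((c, u), rest) =>
      if pvGtCost c (cost.getD u.toNat none) then
        pvDijkstraLoop nw graph fuel rest cost
      else
        let st := (graph.getD u []).foldl (pvStepA nw c) (rest, cost)
        pvDijkstraLoop nw graph fuel st.1 st.2

-- graph[u].append(v) is dict-modify with default [] (exact under Pre_: every
-- u is a key of the comprehension-built dict); indices S, v, D are nonnegative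
-- under Pre_, so .toNat indexing is exact there.
def beautiful_path (N : Int) (M : Int) (S : Int) (D : Int) (node_weights : List Int) (edges : List (Int × Int)) : Int :=
  let graph0 := (PySem.List.pyRange 1 (N + 1) 1).foldl (fun d i => d.insert i ([] : List Int)) PySem.Dict.empty
  let graph := edges.foldl (fun d p => d.modify p.1 [] (fun l => l ++ [p.2])) graph0
  let cost0 := (List.replicate (N + 1).toNat (none : Option Int)).set S.toNat (some (node_weights.getD (S - 1).toNat 0))
  let final := pvDijkstraLoop node_weights graph (pvFuelA N) [(node_weights.getD (S - 1).toNat 0, S)] cost0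
  -- `cost[D] if cost[D] != float('inf') else -1` (inf = none); cost[D] via
  -- pyGet? (Python negative-index wrap; none = IndexError, excluded by Pre_)
  ((PySem.List.pyGet? final D).getD none).getD (-1)

-- ===== PORT B =====
-- Python's None placeholders of B's `cost` are `none`; `cost[v] is None or
-- c < cost[v]` is pvLtCost (shared with port A).
-- the body of `for u, v in edges:` (state = (cost, changed))
def pvStepB (nw : List Int) (s : List (Option Int) × Bool) (p : Int × Int) :
    List (Option Int) × Bool :=
  match s.1.getD p.1.toNat none with
  | none => s
  | some cu =>
    let c := cu + nw.getD (p.2 - 1).toNat 0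
    if pvLtCost c (s.1.getD p.2.toNat none) then (s.1.set p.2.toNat (some c), true) else s

-- one sweep over the whole edge list; returns (new cost, changed flag)
def pvRelaxPass (nw : List Int) (edges : List (Int × Int)) (cost : List (Option Int)) :
    List (Option Int) × Bool :=
  edges.foldl (pvStepB nw) (cost, false)

-- B's while-loop fuel is pvFuelA N as well (proved to exit via an unchanged
-- sweep within this bound whenever Pre_ holds).
def pvBFLoop (nw : List Int) (edges : List (Int × Int)) : Nat → List (Option Int) → List (Option Int)
  | 0, cost => cost
  | fuel + 1, cost =>
    let s := pvRelaxPass nw edges cost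
    if s.2 then pvBFLoop nw edges fuel s.1 else s.1

def beautiful_path_alt (N : Int) (M : Int) (S : Int) (D : Int) (node_weights : List Int) (edges : List (Int × Int)) : Int :=
  let cost0 := (List.replicate (N + 1).toNat (none : Option Int)).set S.toNat (some (node_weights.getD (S - 1).toNat 0))
  let final := pvBFLoop node_weights edges (pvFuelA N) cost0
  -- `cost[D] if cost[D] is not None else -1`; cost[D] via pyGet? (Python
  -- negative-index wrap; none = IndexError, excluded by Pre_)
  ((PySem.List.pyGet? final D).getD none).getD (-1)

-- ===== PRECONDITION & SPEC =====
-- Nodes reachable from S along `edges` (a plain graph closure on the input,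
-- independent of either algorithm; used only to state Pre_).
def pvReachStep (edges : List (Int × Int)) (R : List Int) : List Int :=
  edges.foldl (fun R p => if p.1 ∈ R ∧ p.2 ∉ R then R ++ [p.2] else R) R

def pvReachIter (edges : List (Int × Int)) : Nat → List Int → List Int
  | 0, R => R
  | n + 1, R => pvReachIter edges n (pvReachStep edges R)

def pvReaches (S : Int) (edges : List (Int × Int)) (v : Int) : Bool :=
  decide (v ∈ pvReachIter edges (edges.length + 1) [S])

-- Pre_ keeps the natural graph domain: inputs on which A raises are out (an
-- edge source outside 1..N or S outside 1..N: KeyError; S or a reachable edge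
-- target indexing past node_weights, or D outside the list range: IndexError;
-- a reachable edge target outside 1..N: IndexError or an eventual KeyError);
-- and the node weights the run can accumulate (reachable edge targets) must be
-- nonnegative, since on negative weights A's label-correcting loop can run
-- forever (negative cycles); where both programs still terminate on a negative
-- weight they agree (see the cite).
def Pre_beautiful_path (N : Int) (M : Int) (S : Int) (D : Int) (node_weights : List Int) (edges : List (Int × Int)) : Prop :=
  1 ≤ S ∧ S ≤ N ∧ (S : Int) ≤ node_weights.length ∧
  -(N + 1) ≤ D ∧ D ≤ N ∧
  (∀ p ∈ edges, 1 ≤ p.1 ∧ p.1 ≤ N) ∧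
  (∀ p ∈ edges, pvReaches S edges p.1 = true →
    1 ≤ p.2 ∧ p.2 ≤ N ∧ (p.2 : Int) ≤ node_weights.length ∧
    0 ≤ node_weights.getD (p.2 - 1).toNat 0)

instance (N : Int) (M : Int) (S : Int) (D : Int) (node_weights : List Int) (edges : List (Int × Int)) : Decidable (Pre_beautiful_path N M S D node_weights edges) := by
  unfold Pre_beautiful_path; infer_instance

def pvWitness_beautiful_path : Int × Int × Int × Int × List Int × (List (Int × Int)) :=
  (2, 1, 1, 2, [3, 4], [(1, 2)])

def Spec_beautiful_path (N : Int) (M : Int) (S : Int) (D : Int) (node_weights : List Int) (edges : List (Int × Int)) (out : Int) : Prop := out = beautiful_path_alt N M S D node_weights edges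
instance (N : Int) (M : Int) (S : Int) (D : Int) (node_weights : List Int) (edges : List (Int × Int)) (out : Int) : Decidable (Spec_beautiful_path N M S D node_weights edges out) := by unfold Spec_beautiful_path; infer_instance

-- ===== CLAIM (what is proved, stated in full; the proofs are below) =====
def Claim_equal_beautiful_path : Prop := ∀ (N : Int) (M : Int) (S : Int) (D : Int) (node_weights : List Int) (edges : List (Int × Int)), Dom_beautiful_path N M S D node_weights edges → Pre_beautiful_path N M S D node_weights edges → Spec_beautiful_path N M S D node_weights edges (beautiful_path N M S D node_weights edges)

-- ===== LEMMAS AND PROOFS =====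

-- w(v) = node_weights[v-1], as both ports compute it
def pvw (nw : List Int) (v : Int) : Int := nw.getD (v - 1).toNat 0

-- "x is the accumulated node weight of some walk S → … → v along `edges`"
inductive pvWC (S : Int) (edges : List (Int × Int)) (nw : List Int) : Int → Int → Prop
  | base : pvWC S edges nw S (pvw nw S)
  | step {u v x} : pvWC S edges nw u x → (u, v) ∈ edges → pvWC S edges nw v (x + pvw nw v)

-- ---- reachability-closure facts (for Pre_'s reachable-edge condition) ----

theorem pv_reachStep_ext (edges : List (Int × Int)) :
    ∀ (l : List (Int × Int)) (R : List Int),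
      ∃ ext, l.foldl (fun R p => if p.1 ∈ R ∧ p.2 ∉ R then R ++ [p.2] else R) R = R ++ ext := by
  intro l
  induction l with
  | nil => intro R; exact ⟨[], by simp⟩
  | cons p t ih =>
    intro R
    rw [List.foldl_cons]
    by_cases hc : p.1 ∈ R ∧ p.2 ∉ R
    · rw [if_pos hc]
      obtain ⟨ext, he⟩ := ih (R ++ [p.2])
      exact ⟨[p.2] ++ ext, by rw [he, List.append_assoc]⟩
    · rw [if_neg hc]
      exact ih R

theorem pv_reachStep_fix_closed (edges : List (Int × Int)) :
    ∀ (l : List (Int × Int)) (R : List Int),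
      l.foldl (fun R p => if p.1 ∈ R ∧ p.2 ∉ R then R ++ [p.2] else R) R = R →
      ∀ p ∈ l, p.1 ∈ R → p.2 ∈ R := by
  intro l
  induction l with
  | nil => intro R _ p hp; simp at hp
  | cons q t ih =>
    intro R hfix p hp h1
    by_cases hc : q.1 ∈ R ∧ q.2 ∉ R
    · exfalso
      rw [List.foldl_cons, if_pos hc] at hfix
      obtain ⟨ext, he⟩ := pv_reachStep_ext edges t (R ++ [q.2])
      rw [he, List.append_assoc] at hfix
      have := congrArg List.length hfix
      simp at this
    · rw [List.foldl_cons, if_neg hc] at hfix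
      rcases List.mem_cons.mp hp with rfl | hp
      · by_contra h2
        exact hc ⟨h1, h2⟩
      · exact ih R hfix p hp h1

theorem pv_reachStep_subset (edges : List (Int × Int)) (R : List Int) :
    R ⊆ pvReachStep edges R := by
  obtain ⟨ext, he⟩ := pv_reachStep_ext edges edges R
  rw [pvReachStep, he]
  exact List.subset_append_left _ _

theorem pv_reachIter_subset (edges : List (Int × Int)) :
    ∀ (n : Nat) (R : List Int), R ⊆ pvReachIter edges n R := by
  intro n
  induction n with
  | zero => intro R; exact fun _ h => h
  | succ n ih =>
    intro R
    exact fun x hx => ih (pvReachStep edges R) (pv_reachStep_subset edges R hx)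

theorem pv_reachIter_fix (edges : List (Int × Int)) (R : List Int)
    (h : pvReachStep edges R = R) : ∀ n, pvReachIter edges n R = R := by
  intro n
  induction n with
  | zero => rfl
  | succ n ih => show pvReachIter edges n (pvReachStep edges R) = R; rw [h, ih]

-- distinct entries drawn from S :: targets
def pvRInv (S : Int) (edges : List (Int × Int)) (R : List Int) : Prop :=
  R.Nodup ∧ ∀ x ∈ R, x ∈ S :: edges.map (fun p => p.2)

theorem pv_reachStep_inv (S : Int) (edges : List (Int × Int)) :
    ∀ (l : List (Int × Int)) (R : List Int), (∀ p ∈ l, p ∈ edges) → pvRInv S edges R →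
      pvRInv S edges (l.foldl (fun R p => if p.1 ∈ R ∧ p.2 ∉ R then R ++ [p.2] else R) R) := by
  intro l
  induction l with
  | nil => intro R _ h; exact h
  | cons q t ih =>
    intro R hl hR
    rw [List.foldl_cons]
    by_cases hc : q.1 ∈ R ∧ q.2 ∉ R
    · rw [if_pos hc]
      refine ih _ (fun p hp => hl p (List.mem_cons_of_mem _ hp)) ⟨?_, ?_⟩
      · rw [List.nodup_append]
        refine ⟨hR.1, List.nodup_singleton _, ?_⟩
        intro a ha b hb
        rcases List.mem_singleton.mp hb with rfl
        exact fun he => hc.2 (he ▸ ha)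
      · intro x hx
        rcases List.mem_append.mp hx with hx | hx
        · exact hR.2 x hx
        · rcases List.mem_singleton.mp hx with rfl
          exact List.mem_cons_of_mem _ (List.mem_map.mpr ⟨q, hl q List.mem_cons_self, rfl⟩)
    · rw [if_neg hc]
      exact ih _ (fun p hp => hl p (List.mem_cons_of_mem _ hp)) hR

theorem pv_reachIter_inv (S : Int) (edges : List (Int × Int)) :
    ∀ (n : Nat) (R : List Int), pvRInv S edges R → pvRInv S edges (pvReachIter edges n R) := by
  intro n
  induction n with
  | zero => intro R h; exact h
  | succ n ih => intro R h; exact ih _ (pv_reachStep_inv S edges edges R (fun _ h => h) h)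

theorem pv_rinv_len (S : Int) (edges : List (Int × Int)) (R : List Int)
    (h : pvRInv S edges R) : R.length ≤ edges.length + 1 := by
  have h1 : R.length = R.toFinset.card := (List.toFinset_card_of_nodup h.1).symm
  have h2 : R.toFinset ⊆ (S :: edges.map (fun p => p.2)).toFinset := by
    intro x hx
    rw [List.mem_toFinset] at hx ⊢
    exact h.2 x hx
  calc R.length = R.toFinset.card := h1
    _ ≤ (S :: edges.map (fun p => p.2)).toFinset.card := Finset.card_le_card h2
    _ ≤ (S :: edges.map (fun p => p.2)).length := List.toFinset_card_le _
    _ = edges.length + 1 := by simp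

theorem pv_reach_closed_aux (S : Int) (edges : List (Int × Int)) :
    ∀ (n : Nat) (R : List Int), pvRInv S edges R →
      (∀ p ∈ edges, p.1 ∈ pvReachIter edges n R → p.2 ∈ pvReachIter edges n R) ∨
      R.length + n ≤ (pvReachIter edges n R).length := by
  intro n
  induction n with
  | zero => intro R _; right; simp [pvReachIter]
  | succ n ih =>
    intro R hR
    by_cases hfix : pvReachStep edges R = R
    · left
      have hiter : pvReachIter edges (n + 1) R = R := pv_reachIter_fix edges R hfix (n + 1)
      rw [hiter]
      exact pv_reachStep_fix_closed edges edges R hfix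
    · have hstep : R.length + 1 ≤ (pvReachStep edges R).length := by
        obtain ⟨ext, he⟩ := pv_reachStep_ext edges edges R
        rw [pvReachStep] at hfix ⊢
        rw [he] at hfix ⊢
        cases ext with
        | nil => simp at hfix
        | cons a t => simp
      rcases ih (pvReachStep edges R) (pv_reachStep_inv S edges edges R (fun _ h => h) hR) with
        hcl | hlen
      · left; exact hcl
      · right
        show R.length + (n + 1) ≤ (pvReachIter edges n (pvReachStep edges R)).length
        omega

theorem pv_reach_self (S : Int) (edges : List (Int × Int)) : pvReaches S edges S = true := by
  rw [pvReaches, decide_eq_true_eq]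
  exact pv_reachIter_subset edges _ [S] List.mem_cons_self

theorem pv_reach_closed (S : Int) (edges : List (Int × Int)) (u v : Int)
    (he : (u, v) ∈ edges) (hu : pvReaches S edges u = true) : pvReaches S edges v = true := by
  have hinv : pvRInv S edges [S] := ⟨List.nodup_singleton S, by
    intro x hx
    rcases List.mem_singleton.mp hx with rfl
    exact List.mem_cons_self⟩
  rcases pv_reach_closed_aux S edges (edges.length + 1) [S] hinv with hcl | hlen
  · rw [pvReaches, decide_eq_true_eq] at hu ⊢
    exact hcl (u, v) he hu
  · exfalso
    have := pv_rinv_len S edges _ (pv_reachIter_inv S edges (edges.length + 1) [S] hinv)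
    simp at hlen
    omega

theorem pvWC_reach (S : Int) (edges : List (Int × Int)) (nw : List Int) (v x : Int)
    (h : pvWC S edges nw v x) : pvReaches S edges v = true := by
  induction h with
  | base => exact pv_reach_self S edges
  | step hwc he ih => exact pv_reach_closed S edges _ _ he ih

-- number of finite entries
def pvK (cost : List (Option Int)) : Nat := cost.countP (fun o => o.isSome)

-- termination potential: a finite entry counts itself, an inf entry N*2^31+1
def pvF (N : Int) (o : Option Int) : Int :=
  match o with
  | none => N * 2147483648 + 2147483648 + 1
  | some x => x + 2147483648

def pvPhi (N : Int) (cost : List (Option Int)) : Int := (cost.map (pvF N)).sum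

-- the Pre_/Dom facts the proofs use, bundled
structure pvCtx (N S : Int) (nw : List Int) (edges : List (Int × Int)) : Prop where
  hS1 : 1 ≤ S
  hSN : S ≤ N
  hwSlb : -2147483648 ≤ pvw nw S
  hwWS : pvw nw S ≤ 2147483648
  hreach : ∀ p ∈ edges, pvReaches S edges p.1 = true →
    1 ≤ p.2 ∧ p.2 ≤ N ∧ 0 ≤ pvw nw p.2 ∧ pvw nw p.2 ≤ 2147483648

-- state invariant common to both algorithms
structure pvCostOK (N S : Int) (nw : List Int) (edges : List (Int × Int)) (cost : List (Option Int)) : Prop where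
  len : cost.length = (N + 1).toNat
  zero : cost.getD 0 none = none
  bnd : ∀ o ∈ cost, ∀ x, o = some x → -2147483648 ≤ x ∧ x ≤ (pvK cost : Int) * 2147483648
  ach : ∀ v x, cost.getD v.toNat none = some x → 1 ≤ v ∧ v ≤ N ∧ pvWC S edges nw v x
  sbase : ∃ cs, cost.getD S.toNat none = some cs ∧ cs ≤ pvw nw S

-- "no edge can still improve cost"
def pvStable (nw : List Int) (edges : List (Int × Int)) (cost : List (Option Int)) : Prop :=
  ∀ u v, (u, v) ∈ edges → ∀ cu, cost.getD u.toNat none = some cu →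
    ∃ cv, cost.getD v.toNat none = some cv ∧ cv ≤ cu + pvw nw v

-- pq invariant for A: every pending pair is a walk weight not below the
-- recorded cost of its node
def pvPQInv (N S : Int) (nw : List Int) (edges : List (Int × Int))
    (pq : List (Int × Int)) (cost : List (Option Int)) : Prop :=
  ∀ p ∈ pq, 1 ≤ p.2 ∧ p.2 ≤ N ∧ pvWC S edges nw p.2 p.1 ∧
    ∃ y, cost.getD p.2.toNat none = some y ∧ y ≤ p.1

def pvRelaxed (nw : List Int) (edges : List (Int × Int)) (cost : List (Option Int))
    (u cu : Int) : Prop :=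
  ∀ v, (u, v) ∈ edges → ∃ cv, cost.getD v.toNat none = some cv ∧ cv ≤ cu + pvw nw v

-- every finite node is fully relaxed or has a pending witness in the queue
def pvPend (N S : Int) (nw : List Int) (edges : List (Int × Int))
    (pq : List (Int × Int)) (cost : List (Option Int)) : Prop :=
  ∀ u cu, cost.getD u.toNat none = some cu →
    pvRelaxed nw edges cost u cu ∨ (cu, u) ∈ pq

-- ---- generic small lemmas ----

theorem pv_toNat_eq {x v : Int} (hv : 1 ≤ v) (h : x.toNat = v.toNat) : x = v := by omega

theorem pv_getD_eq_getElem (l : List (Option Int)) (i : Nat) (h : i < l.length) :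
    l.getD i none = l[i] := by
  simp [List.getD, List.getElem?_eq_getElem h]

theorem pv_getD_set_self (l : List (Option Int)) (i : Nat) (h : i < l.length) (a : Option Int) :
    (l.set i a).getD i none = a := by
  rw [pv_getD_eq_getElem _ _ (by simpa using h)]
  simp [List.getElem_set_self]

theorem pv_getD_set_ne (l : List (Option Int)) (i j : Nat) (a : Option Int) (h : i ≠ j) :
    (l.set i a).getD j none = l.getD j none := by
  simp [List.getD, List.getElem?_set_ne h]

theorem pv_mem_of_getD (l : List (Option Int)) (i : Nat) (x : Int)
    (h : l.getD i none = some x) : some x ∈ l := by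
  by_cases hi : i < l.length
  · rw [pv_getD_eq_getElem _ _ hi] at h; rw [← h]; exact List.getElem_mem hi
  · rw [List.getD, List.getElem?_eq_none (by omega)] at h; simp at h

theorem pvK_set_some (l : List (Option Int)) (i : Nat) (a : Int) (y : Int)
    (h : l.getD i none = some y) : pvK (l.set i (some a)) = pvK l := by
  induction l generalizing i with
  | nil => simp [List.getD] at h
  | cons o t ih =>
    cases i with
    | zero =>
      simp [List.getD] at h
      subst h
      simp [pvK]
    | succ n =>
      simp only [List.getD_cons_succ] at h
      simp only [List.set_cons_succ, pvK, List.countP_cons]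
      have := ih n h
      simp only [pvK] at this
      omega

theorem pvK_set_new (l : List (Option Int)) (i : Nat) (a : Int) (hi : i < l.length)
    (h : l.getD i none = none) : pvK (l.set i (some a)) = pvK l + 1 := by
  induction l generalizing i with
  | nil => simp at hi
  | cons o t ih =>
    cases i with
    | zero =>
      simp [List.getD] at h
      subst h
      simp [pvK]
    | succ n =>
      simp only [List.getD_cons_succ] at h
      simp only [List.length_cons, Nat.succ_lt_succ_iff] at hi
      simp only [List.set_cons_succ, pvK, List.countP_cons]
      have := ih n hi h
      simp only [pvK] at this
      omega

theorem pvK_none_lt (l : List (Option Int)) (n : Nat) (hn : n < l.length)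
    (h : l.getD n none = none) : pvK l + 1 ≤ l.length := by
  induction l generalizing n with
  | nil => simp at hn
  | cons o t ih =>
    cases n with
    | zero =>
      simp [List.getD] at h
      subst h
      have := List.countP_le_length (l := t) (p := fun o : Option Int => o.isSome)
      simp [pvK]
      omega
    | succ n =>
      simp only [List.getD_cons_succ] at h
      simp only [List.length_cons, Nat.succ_lt_succ_iff] at hn
      have := ih n hn h
      simp only [pvK, List.countP_cons, List.length_cons] at *
      have hle : (if (o.isSome : Bool) = true then 1 else 0) ≤ 1 := by split <;> omega
      omega

-- two distinct inf entries leave room: pvK ≤ length - 2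
theorem pv_two_none (l : List (Option Int)) (j : Nat) (hj : j < l.length) (h0 : 0 < j)
    (hz : l.getD 0 none = none) (hn : l.getD j none = none) :
    pvK l + 2 ≤ l.length := by
  cases l with
  | nil => simp at hj
  | cons o t =>
    simp [List.getD] at hz
    subst hz
    cases j with
    | zero => omega
    | succ n =>
      simp only [List.getD_cons_succ] at hn
      simp only [List.length_cons, Nat.succ_lt_succ_iff] at hj
      have h1 := pvK_none_lt t n hj hn
      have hgoal : pvK (none :: t) = pvK t := by simp [pvK]
      rw [hgoal, List.length_cons]
      omega

theorem pvPhi_set (N : Int) (l : List (Option Int)) (i : Nat) (h : i < l.length) (a : Option Int) :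
    pvPhi N (l.set i a) = pvPhi N l + pvF N a - pvF N (l.getD i none) := by
  induction l generalizing i with
  | nil => simp at h
  | cons o t ih =>
    cases i with
    | zero => simp [pvPhi, List.getD]; ring
    | succ n =>
      simp only [List.length_cons, Nat.succ_lt_succ_iff] at h
      simp only [List.set_cons_succ, List.getD_cons_succ, pvPhi, List.map_cons, List.sum_cons]
      have := ih n h
      simp only [pvPhi] at this
      omega

theorem pvPhi_nonneg (N S : Int) (nw : List Int) (edges : List (Int × Int))
    (cost : List (Option Int)) (hN : 0 ≤ N) (hok : pvCostOK N S nw edges cost) :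
    0 ≤ pvPhi N cost := by
  apply List.sum_nonneg
  intro x hx
  obtain ⟨o, ho, rfl⟩ := List.mem_map.mp hx
  cases o with
  | none => simp only [pvF]; nlinarith
  | some y => have := (hok.bnd _ ho y rfl).1; simp only [pvF]; omega

-- ---- pvLexPop facts ----

theorem pv_pick_mem (xs : List (Int × Int)) (a : Int × Int) :
    xs.foldl (fun a b => if b.1 < a.1 ∨ (b.1 = a.1 ∧ b.2 < a.2) then b else a) a = a ∨
    xs.foldl (fun a b => if b.1 < a.1 ∨ (b.1 = a.1 ∧ b.2 < a.2) then b else a) a ∈ xs := by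
  induction xs generalizing a with
  | nil => left; rfl
  | cons x t ih =>
    simp only [List.foldl_cons]
    rcases ih (if x.1 < a.1 ∨ (x.1 = a.1 ∧ x.2 < a.2) then x else a) with h | h
    · rw [h]
      split
      · right; exact List.mem_cons_self
      · left; rfl
    · right; exact List.mem_cons_of_mem _ h

theorem pv_lexPop_eq_none {pq : List (Int × Int)} (h : pvLexPop pq = none) : pq = [] := by
  cases pq with
  | nil => rfl
  | cons x xs => simp [pvLexPop] at h

theorem pv_lexPop_spec {pq : List (Int × Int)} {m : Int × Int} {rest : List (Int × Int)}
    (h : pvLexPop pq = some (m, rest)) : m ∈ pq ∧ rest = pq.erase m := by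
  cases pq with
  | nil => simp [pvLexPop] at h
  | cons x xs =>
    simp only [pvLexPop, Option.some.injEq, Prod.mk.injEq] at h
    obtain ⟨hm, hr⟩ := h
    subst hm
    refine ⟨?_, hr.symm⟩
    rcases pv_pick_mem xs x with h | h
    · rw [h]; exact List.mem_cons_self
    · exact List.mem_cons_of_mem _ h

-- ---- adjacency-dict facts ----

theorem pv_graph0_getD (N : Int) (k : Int) :
    ((PySem.List.pyRange 1 (N + 1) 1).foldl (fun d i => d.insert i ([] : List Int)) PySem.Dict.empty).getD k [] = [] := by
  suffices h : ∀ (l : List Int) (d : PySem.Dict Int (List Int)), (∀ k', d.getD k' [] = []) →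
      ∀ k', (l.foldl (fun d i => d.insert i ([] : List Int)) d).getD k' [] = [] by
    exact h _ _ (fun k' => PySem.Dict.getD_empty k' []) k
  intro l
  induction l with
  | nil => intro d hd k'; exact hd k'
  | cons i t ih =>
    intro d hd k'
    refine ih _ (fun k'' => ?_) k'
    rw [PySem.Dict.getD_insert]
    split <;> simp [hd]

theorem pv_graph_getD (N : Int) (edges : List (Int × Int)) (u : Int) :
    (edges.foldl (fun d p => d.modify p.1 [] (fun l => l ++ [p.2]))
      ((PySem.List.pyRange 1 (N + 1) 1).foldl (fun d i => d.insert i ([] : List Int)) PySem.Dict.empty)).getD u []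
      = (edges.filter (fun p => p.1 == u)).map (fun p => p.2) := by
  rw [PySem.Dict.getD_foldl_modify_append, pv_graph0_getD]
  rfl

theorem pv_adj_mem (N : Int) (edges : List (Int × Int)) (u v : Int) :
    v ∈ (edges.foldl (fun d p => d.modify p.1 [] (fun l => l ++ [p.2]))
      ((PySem.List.pyRange 1 (N + 1) 1).foldl (fun d i => d.insert i ([] : List Int)) PySem.Dict.empty)).getD u []
    ↔ (u, v) ∈ edges := by
  rw [pv_graph_getD]
  simp only [List.mem_map, List.mem_filter, beq_iff_eq]
  constructor
  · rintro ⟨p, ⟨hp, h1⟩, h2⟩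
    have : p = (u, v) := by
      cases p; simp_all
    rwa [this] at hp
  · intro h
    exact ⟨(u, v), ⟨h, rfl⟩, rfl⟩

-- ---- single-relaxation update facts (shared by both algorithms) ----

theorem pv_getD_lt_length (l : List (Option Int)) (t : Nat) (x : Int)
    (h : l.getD t none = some x) : t < l.length := by
  by_contra hc
  rw [List.getD, List.getElem?_eq_none (by omega)] at h
  simp at h

theorem pvLtCost_false {c : Int} {o : Option Int} (h : pvLtCost c o = false) :
    ∃ y, o = some y ∧ y ≤ c := by
  cases o with
  | none => simp [pvLtCost] at h
  | some y =>
    refine ⟨y, rfl, ?_⟩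
    simp [pvLtCost] at h
    omega

theorem pvLtCost_some {c y : Int} (h : pvLtCost c (some y) = true) : c < y := by
  simpa [pvLtCost] using h

-- an already-finite entry bounded by B stays finite and bounded after a relaxation write
theorem pv_persist (cost : List (Option Int)) (v nc : Int)
    (hset : pvLtCost nc (cost.getD v.toNat none) = true) (t : Nat) (cv B : Int)
    (h : cost.getD t none = some cv) (hB : cv ≤ B) :
    ∃ cv', (cost.set v.toNat (some nc)).getD t none = some cv' ∧ cv' ≤ B := by
  by_cases ht : t = v.toNat
  · subst ht
    rw [h] at hset
    have hlt := pvLtCost_some hset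
    exact ⟨nc, pv_getD_set_self _ _ (pv_getD_lt_length _ _ _ h) _, by omega⟩
  · rw [pv_getD_set_ne _ _ _ _ (fun he => ht he.symm)]
    exact ⟨cv, h, hB⟩

theorem pv_update_ok (N S : Int) (nw : List Int) (edges : List (Int × Int))
    (ctx : pvCtx N S nw edges) (cost : List (Option Int)) (hok : pvCostOK N S nw edges cost)
    (v nc : Int) (hv1 : 1 ≤ v) (hvN : v ≤ N)
    (hwcv : pvWC S edges nw v nc) (hnclb : -2147483648 ≤ nc)
    (hncK : nc ≤ ((pvK cost : Int) + 1) * 2147483648)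
    (hset : pvLtCost nc (cost.getD v.toNat none) = true) :
    pvCostOK N S nw edges (cost.set v.toNat (some nc)) ∧
    pvPhi N (cost.set v.toNat (some nc)) + 1 ≤ pvPhi N cost ∧
    (pvK cost : Int) ≤ (pvK (cost.set v.toNat (some nc)) : Int) := by
  have hN1 : 1 ≤ N := le_trans ctx.hS1 ctx.hSN
  have hvlen : v.toNat < cost.length := by rw [hok.len]; omega
  have hvt1 : 1 ≤ v.toNat := by omega
  have hlen' : (cost.set v.toNat (some nc)).length = (N + 1).toNat := by
    rw [List.length_set, hok.len]
  have hzero' : (cost.set v.toNat (some nc)).getD 0 none = none := by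
    rw [pv_getD_set_ne _ _ _ _ (by omega)]; exact hok.zero
  have hach' : ∀ x cx, (cost.set v.toNat (some nc)).getD x.toNat none = some cx →
      1 ≤ x ∧ x ≤ N ∧ pvWC S edges nw x cx := by
    intro x cx hx
    by_cases hxt : x.toNat = v.toNat
    · rw [hxt, pv_getD_set_self _ _ hvlen] at hx
      cases hx
      exact ⟨by rw [pv_toNat_eq hv1 hxt]; omega, by rw [pv_toNat_eq hv1 hxt]; omega, by
        rw [pv_toNat_eq hv1 hxt]; exact hwcv⟩
    · rw [pv_getD_set_ne _ _ _ _ (fun he => hxt he.symm)] at hx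
      exact hok.ach x cx hx
  have hsbase' : ∃ cs, (cost.set v.toNat (some nc)).getD S.toNat none = some cs ∧ cs ≤ pvw nw S := by
    obtain ⟨cs, hcs, hle⟩ := hok.sbase
    exact pv_persist cost v nc hset S.toNat cs (pvw nw S) hcs hle
  cases hold : cost.getD v.toNat none with
  | some y =>
    rw [hold] at hset
    have hlty := pvLtCost_some hset
    have hK : pvK (cost.set v.toNat (some nc)) = pvK cost := pvK_set_some cost v.toNat nc y hold
    have hyb := hok.bnd _ (pv_mem_of_getD cost v.toNat y hold) y rfl
    refine ⟨⟨hlen', hzero', ?_, hach', hsbase'⟩, ?_, by omega⟩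
    · intro o ho x hx
      subst hx
      rw [hK]
      rcases List.mem_or_eq_of_mem_set ho with h | h
      · exact hok.bnd _ h x rfl
      · cases h; exact ⟨hnclb, by omega⟩
    · rw [pvPhi_set N cost v.toNat hvlen, hold]
      simp only [pvF]
      omega
  | none =>
    rw [hold] at hset
    have hK : pvK (cost.set v.toNat (some nc)) = pvK cost + 1 :=
      pvK_set_new cost v.toNat nc hvlen hold
    have htwo : pvK cost + 2 ≤ cost.length :=
      pv_two_none cost v.toNat hvlen (by omega) hok.zero hold
    have hKN : (pvK cost : Int) + 1 ≤ N := by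
      rw [hok.len] at htwo; omega
    have hncNW : nc ≤ N * 2147483648 := by
      calc nc ≤ ((pvK cost : Int) + 1) * 2147483648 := hncK
        _ ≤ N * 2147483648 := by
            apply mul_le_mul_of_nonneg_right hKN (by norm_num)
    refine ⟨⟨hlen', hzero', ?_, hach', hsbase'⟩, ?_, by omega⟩
    · intro o ho x hx
      subst hx
      rw [hK]
      rcases List.mem_or_eq_of_mem_set ho with h | h
      · have := hok.bnd _ h x rfl
        refine ⟨this.1, le_trans this.2 ?_⟩
        push_cast
        nlinarith [this.2]
      · cases h
        refine ⟨hnclb, ?_⟩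
        push_cast
        omega
    · rw [pvPhi_set N cost v.toNat hvlen, hold]
      simp only [pvF]
      omega

-- ---- the common fixpoint argument ----

theorem pv_low_of_stable (N S : Int) (nw : List Int) (edges : List (Int × Int))
    (cost : List (Option Int)) (hok : pvCostOK N S nw edges cost)
    (hst : pvStable nw edges cost) :
    ∀ v x, pvWC S edges nw v x → ∃ y, cost.getD v.toNat none = some y ∧ y ≤ x := by
  intro v x h
  induction h with
  | base => exact hok.sbase
  | step hwc he ih =>
    obtain ⟨y, hy, hyx⟩ := ih
    obtain ⟨cv, hcv, hle⟩ := hst _ _ he y hy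
    exact ⟨cv, hcv, by omega⟩

theorem pv_agree (N S : Int) (nw : List Int) (edges : List (Int × Int))
    (c1 c2 : List (Option Int))
    (h1 : pvCostOK N S nw edges c1) (h2 : pvCostOK N S nw edges c2)
    (s1 : pvStable nw edges c1) (s2 : pvStable nw edges c2) (v : Int) :
    c1.getD v.toNat none = c2.getD v.toNat none := by
  cases hv1 : c1.getD v.toNat none with
  | none =>
    cases hv2 : c2.getD v.toNat none with
    | none => rfl
    | some y =>
      obtain ⟨_, _, hwc⟩ := h2.ach v y hv2
      obtain ⟨z, hz, _⟩ := pv_low_of_stable N S nw edges c1 h1 s1 v y hwc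
      rw [hv1] at hz; cases hz
  | some x =>
    obtain ⟨_, _, hwc1⟩ := h1.ach v x hv1
    obtain ⟨y2, hy2, hle2⟩ := pv_low_of_stable N S nw edges c2 h2 s2 v x hwc1
    obtain ⟨_, _, hwc2⟩ := h2.ach v y2 hy2
    obtain ⟨y1, hy1, hle1⟩ := pv_low_of_stable N S nw edges c1 h1 s1 v y2 hwc2
    rw [hv1] at hy1
    cases hy1
    rw [hy2]
    congr 1
    omega

theorem pv_agree_list (N S : Int) (nw : List Int) (edges : List (Int × Int))
    (c1 c2 : List (Option Int))
    (h1 : pvCostOK N S nw edges c1) (h2 : pvCostOK N S nw edges c2)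
    (s1 : pvStable nw edges c1) (s2 : pvStable nw edges c2) : c1 = c2 := by
  have hnat : ∀ t : Nat, c1.getD t none = c2.getD t none := by
    intro t
    by_cases ht0 : t = 0
    · subst ht0; rw [h1.zero, h2.zero]
    · by_cases htN : (t : Int) ≤ N
      · have := pv_agree N S nw edges c1 c2 h1 h2 s1 s2 (t : Int)
        simpa using this
      · have hlen1 : c1.length ≤ t := by rw [h1.len]; omega
        have hlen2 : c2.length ≤ t := by rw [h2.len]; omega
        rw [List.getD, List.getElem?_eq_none hlen1, List.getD, List.getElem?_eq_none hlen2]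
  apply List.ext_getElem (by rw [h1.len, h2.len])
  intro i hi1 hi2
  have := hnat i
  rwa [pv_getD_eq_getElem _ _ hi1, pv_getD_eq_getElem _ _ hi2] at this

-- ---- A: the inner `for v in graph[u]` loop ----

structure pvInnerInv (N S u c : Int) (nw : List Int) (edges : List (Int × Int))
    (done : List Int) (pq : List (Int × Int)) (cost : List (Option Int)) : Prop where
  ok : pvCostOK N S nw edges cost
  pqi : pvPQInv N S nw edges pq cost
  p1 : ∀ x cx, x ≠ u → cost.getD x.toNat none = some cx →
        pvRelaxed nw edges cost x cx ∨ (cx, x) ∈ pq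
  p2 : (cost.getD u.toNat none = some c ∧
        ∀ v ∈ done, ∃ cv, cost.getD v.toNat none = some cv ∧ cv ≤ c + pvw nw v)
       ∨ (∃ cu', cost.getD u.toNat none = some cu' ∧ (cu', u) ∈ pq)
  hcK : c ≤ (pvK cost : Int) * 2147483648

theorem pv_innerA (N S : Int) (nw : List Int) (edges : List (Int × Int))
    (ctx : pvCtx N S nw edges) (u c : Int) (hu1 : 1 ≤ u) (huN : u ≤ N)
    (hwc : pvWC S edges nw u c) (hc0 : -2147483648 ≤ c) :
    ∀ (l : List Int) (done : List Int) (pq : List (Int × Int)) (cost : List (Option Int)),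
      (∀ v ∈ l, (u, v) ∈ edges) →
      pvInnerInv N S u c nw edges done pq cost →
      pvInnerInv N S u c nw edges (done ++ l)
        (l.foldl (pvStepA nw c) (pq, cost)).1 (l.foldl (pvStepA nw c) (pq, cost)).2 ∧
      pvPhi N (l.foldl (pvStepA nw c) (pq, cost)).2 +
        ((l.foldl (pvStepA nw c) (pq, cost)).1.length : Int) ≤
        pvPhi N cost + (pq.length : Int) := by
  intro l
  induction l with
  | nil =>
    intro done pq cost _ inv
    simp only [List.foldl_nil, List.append_nil]
    exact ⟨inv, le_refl _⟩
  | cons v l' ih =>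
    intro done pq cost hl inv
    have hedge : (u, v) ∈ edges := hl v List.mem_cons_self
    have hru : pvReaches S edges u = true := pvWC_reach S edges nw u c hwc
    have hrc := ctx.hreach _ hedge hru
    have hv1 : 1 ≤ v := hrc.1
    have hvN : v ≤ N := hrc.2.1
    have hpw0 : 0 ≤ pvw nw v := hrc.2.2.1
    have hpwW : pvw nw v ≤ 2147483648 := hrc.2.2.2
    have hvlen : v.toNat < cost.length := by rw [inv.ok.len]; have := le_trans ctx.hS1 ctx.hSN; omega
    have hpwdef : nw.getD (v - 1).toNat 0 = pvw nw v := rfl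
    have hstep : pvStepA nw c (pq, cost) v =
        if pvLtCost (c + pvw nw v) (cost.getD v.toNat none) then
          (pq ++ [(c + pvw nw v, v)], cost.set v.toNat (some (c + pvw nw v)))
        else (pq, cost) := by
      simp only [pvStepA, hpwdef]
    rw [List.foldl_cons, hstep]
    by_cases hlt : pvLtCost (c + pvw nw v) (cost.getD v.toNat none) = true
    · rw [if_pos hlt]
      set nc := c + pvw nw v with hnc
      have hwcv : pvWC S edges nw v nc := pvWC.step hwc hedge
      have hncK : nc ≤ ((pvK cost : Int) + 1) * 2147483648 := by
        have := inv.hcK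
        nlinarith
      obtain ⟨hok', hphi', hKmono⟩ :=
        pv_update_ok N S nw edges ctx cost inv.ok v nc hv1 hvN hwcv (by omega) hncK hlt
      set cost' := cost.set v.toNat (some nc) with hcost'
      have hselfD : cost'.getD v.toNat none = some nc := pv_getD_set_self _ _ hvlen _
      have inv' : pvInnerInv N S u c nw edges (done ++ [v]) (pq ++ [(nc, v)]) cost' := by
        refine ⟨hok', ?_, ?_, ?_, ?_⟩
        · intro p hp
          rcases List.mem_append.mp hp with hp | hp
          · obtain ⟨r1, r2, hwcp, y, hy, hyp⟩ := inv.pqi p hp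
            obtain ⟨y', hy', hyp'⟩ := pv_persist cost v nc hlt p.2.toNat y p.1 hy hyp
            exact ⟨r1, r2, hwcp, y', hy', hyp'⟩
          · rcases List.mem_singleton.mp hp with rfl
            exact ⟨hv1, hvN, hwcv, nc, hselfD, le_refl _⟩
        · intro x cx hxne hx
          by_cases hxt : x.toNat = v.toNat
          · have hxv : x = v := pv_toNat_eq hv1 hxt
            subst hxv
            rw [hxt, hselfD] at hx
            have hcx : nc = cx := by injection hx
            subst hcx
            right
            exact List.mem_append.mpr (Or.inr (List.mem_singleton.mpr rfl))
          · rw [pv_getD_set_ne _ _ _ _ (fun he => hxt he.symm)] at hx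
            rcases inv.p1 x cx hxne hx with hrel | hmem
            · left
              intro v' he'
              obtain ⟨cv', hcv', hle'⟩ := hrel v' he'
              exact pv_persist cost v nc hlt v'.toNat cv' (cx + pvw nw v') hcv' hle'
            · right; exact List.mem_append.mpr (Or.inl hmem)
        · by_cases huv : u = v
          · subst huv
            right
            exact ⟨nc, hselfD, List.mem_append.mpr (Or.inr (List.mem_singleton.mpr rfl))⟩
          · have hut : u.toNat ≠ v.toNat := by omega
            have hgu : cost'.getD u.toNat none = cost.getD u.toNat none :=
              pv_getD_set_ne _ _ _ _ (fun he => hut he.symm)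
            rcases inv.p2 with ⟨hcu, hdone⟩ | ⟨cu', h1, h2⟩
            · left
              refine ⟨by rw [hgu]; exact hcu, ?_⟩
              intro v' hv'
              rcases List.mem_append.mp hv' with hv' | hv'
              · obtain ⟨cv', hcv', hle'⟩ := hdone v' hv'
                exact pv_persist cost v nc hlt v'.toNat cv' (c + pvw nw v') hcv' hle'
              · rcases List.mem_singleton.mp hv' with rfl
                exact ⟨nc, hselfD, le_refl _⟩
            · right
              exact ⟨cu', by rw [hgu]; exact h1, List.mem_append.mpr (Or.inl h2)⟩
        · calc c ≤ (pvK cost : Int) * 2147483648 := inv.hcK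
            _ ≤ (pvK cost' : Int) * 2147483648 := by nlinarith
      have hres := ih (done ++ [v]) (pq ++ [(nc, v)]) cost' (fun v' hv' => hl v' (List.mem_cons_of_mem _ hv')) inv'
      obtain ⟨hinv2, hle2⟩ := hres
      refine ⟨by simpa using hinv2, ?_⟩
      rw [List.length_append, List.length_singleton] at hle2
      push_cast at hle2 ⊢
      omega
    · rw [if_neg hlt]
      rw [Bool.not_eq_true] at hlt
      obtain ⟨cv, hcv, hle⟩ := pvLtCost_false hlt
      have inv' : pvInnerInv N S u c nw edges (done ++ [v]) pq cost := by
        refine ⟨inv.ok, inv.pqi, inv.p1, ?_, inv.hcK⟩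
        rcases inv.p2 with ⟨hcu, hdone⟩ | hr
        · left
          refine ⟨hcu, ?_⟩
          intro v' hv'
          rcases List.mem_append.mp hv' with hv' | hv'
          · exact hdone v' hv'
          · rcases List.mem_singleton.mp hv' with rfl
            exact ⟨cv, hcv, hle⟩
        · right; exact hr
      have hres := ih (done ++ [v]) pq cost (fun v' hv' => hl v' (List.mem_cons_of_mem _ hv')) inv'
      exact ⟨by simpa using hres.1, hres.2⟩

-- ---- A: the while-loop ----

theorem pv_runA (N S : Int) (nw : List Int) (edges : List (Int × Int))
    (graph : PySem.Dict Int (List Int)) (ctx : pvCtx N S nw edges)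
    (hadj : ∀ u v, v ∈ graph.getD u [] ↔ (u, v) ∈ edges) :
    ∀ (fuel : Nat) (pq : List (Int × Int)) (cost : List (Option Int)),
      pvCostOK N S nw edges cost → pvPQInv N S nw edges pq cost →
      pvPend N S nw edges pq cost →
      pvPhi N cost + (pq.length : Int) < (fuel : Int) →
      pvCostOK N S nw edges (pvDijkstraLoop nw graph fuel pq cost) ∧
      pvStable nw edges (pvDijkstraLoop nw graph fuel pq cost) := by
  intro fuel
  induction fuel with
  | zero =>
    intro pq cost hok _ _ hfuel
    have h0 := pvPhi_nonneg N S nw edges cost (by have := ctx.hS1; have := ctx.hSN; omega) hok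
    exfalso
    have : (0 : Int) ≤ (pq.length : Int) := by positivity
    push_cast at hfuel
    omega
  | succ fuel ih =>
    intro pq cost hok hpq hpend hfuel
    cases hpop : pvLexPop pq with
    | none =>
      have hpqe := pv_lexPop_eq_none hpop
      simp only [pvDijkstraLoop, hpop]
      refine ⟨hok, ?_⟩
      intro u v he cu hcu
      rcases hpend u cu hcu with hrel | hmem
      · exact hrel v he
      · rw [hpqe] at hmem; simp at hmem
    | some x =>
      obtain ⟨⟨c, u⟩, rest⟩ := x
      obtain ⟨hmem, hrest⟩ := pv_lexPop_spec hpop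
      obtain ⟨hu1, huN, hwc, y, hy, hyc⟩ := hpq _ hmem
      have hrlen : rest.length + 1 = pq.length := by
        rw [hrest, List.length_erase_of_mem hmem]
        have : 0 < pq.length := List.length_pos_of_mem hmem
        omega
      simp only [pvDijkstraLoop, hpop]
      by_cases hskip : pvGtCost c (cost.getD u.toNat none) = true
      · rw [if_pos hskip]
        rw [hy] at hskip
        have hyltc : y < c := by simpa [pvGtCost] using hskip
        refine ih rest cost hok ?_ ?_ ?_
        · intro p hp
          exact hpq p (by rw [hrest] at hp; exact List.mem_of_mem_erase hp)
        · intro u₀ cu₀ hcu₀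
          rcases hpend u₀ cu₀ hcu₀ with hrel | hm
          · exact Or.inl hrel
          · right
            rw [hrest]
            have hne : (cu₀, u₀) ≠ (c, u) := by
              intro he
              injection he with he1 he2
              subst he1; subst he2
              rw [hy] at hcu₀
              injection hcu₀ with h'
              omega
            exact (List.mem_erase_of_ne hne).mpr hm
        · push_cast at hfuel ⊢; omega
      · rw [if_neg hskip]
        rw [hy] at hskip
        have hyec : y = c := by
          simp [pvGtCost] at hskip
          omega
        subst hyec
        have hgc : cost.getD u.toNat none = some y := hy
        have hbnd := hok.bnd _ (pv_mem_of_getD cost u.toNat y hgc) y rfl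
        have hl : ∀ v ∈ graph.getD u [], (u, v) ∈ edges := fun v hv => (hadj u v).mp hv
        have hpqrest : pvPQInv N S nw edges rest cost := by
          intro p hp
          exact hpq p (by rw [hrest] at hp; exact List.mem_of_mem_erase hp)
        have hp1 : ∀ x cx, x ≠ u → cost.getD x.toNat none = some cx →
            pvRelaxed nw edges cost x cx ∨ (cx, x) ∈ rest := by
          intro x cx hxne hx
          rcases hpend x cx hx with hrel | hm
          · exact Or.inl hrel
          · right
            rw [hrest]
            have hne : (cx, x) ≠ (y, u) := by
              intro he; injection he with he1 he2; exact hxne he2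
            exact (List.mem_erase_of_ne hne).mpr hm
        obtain ⟨inv', hle⟩ := pv_innerA N S nw edges ctx u y hu1 huN hwc hbnd.1
          (graph.getD u []) [] rest cost hl
          ⟨hok, hpqrest, hp1, Or.inl ⟨hgc, by simp⟩, hbnd.2⟩
        refine ih _ _ inv'.ok inv'.pqi ?_ ?_
        · intro u₀ cu₀ hcu₀
          by_cases hue : u₀ = u
          · subst hue
            rcases inv'.p2 with ⟨hcu', hdone⟩ | ⟨cu', h1, h2⟩
            · rw [hcu'] at hcu₀
              injection hcu₀ with he
              subst he
              left
              intro v hv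
              exact hdone v (by simpa using (hadj u₀ v).mpr hv)
            · rw [h1] at hcu₀
              injection hcu₀ with he
              subst he
              exact Or.inr h2
          · rcases inv'.p1 u₀ cu₀ hue hcu₀ with hrel | hm
            · exact Or.inl hrel
            · exact Or.inr hm
        · push_cast at hfuel hle ⊢
          omega

-- ---- B: one sweep, then the while-loop ----

theorem pv_flagB_mono (nw : List Int) :
    ∀ (t : List (Int × Int)) (cost : List (Option Int)),
      (t.foldl (pvStepB nw) (cost, true)).2 = true := by
  intro t
  induction t with
  | nil => intro cost; rfl
  | cons p t ih =>
    intro cost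
    rw [List.foldl_cons]
    have hstep : ∃ c', pvStepB nw (cost, true) p = (c', true) := by
      cases h : cost.getD p.1.toNat none with
      | none =>
        refine ⟨cost, ?_⟩
        simp only [pvStepB]
        rw [h]
      | some cu =>
        by_cases hlt : pvLtCost (cu + nw.getD (p.2 - 1).toNat 0) (cost.getD p.2.toNat none) = true
        · refine ⟨cost.set p.2.toNat (some (cu + nw.getD (p.2 - 1).toNat 0)), ?_⟩
          simp only [pvStepB]
          rw [h]
          exact if_pos hlt
        · refine ⟨cost, ?_⟩
          simp only [pvStepB]
          rw [h]
          exact if_neg hlt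
    obtain ⟨c', hc'⟩ := hstep
    rw [hc']
    exact ih c'

theorem pv_stepB_fst (nw : List Int) (cost : List (Option Int)) (b b' : Bool) (p : Int × Int) :
    (pvStepB nw (cost, b) p).1 = (pvStepB nw (cost, b') p).1 := by
  simp only [pvStepB]
  cases h : cost.getD p.1.toNat none with
  | none => rfl
  | some cu => split <;> first | rfl | (split <;> rfl)

theorem pv_foldB_fst (nw : List Int) :
    ∀ (t : List (Int × Int)) (cost : List (Option Int)) (b b' : Bool),
      (t.foldl (pvStepB nw) (cost, b)).1 = (t.foldl (pvStepB nw) (cost, b')).1 := by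
  intro t
  induction t with
  | nil => intros; rfl
  | cons p t ih =>
    intro cost b b'
    rw [List.foldl_cons, List.foldl_cons]
    obtain ⟨c1, f1, e1⟩ : ∃ c f, pvStepB nw (cost, b) p = (c, f) := ⟨_, _, rfl⟩
    obtain ⟨c2, f2, e2⟩ : ∃ c f, pvStepB nw (cost, b') p = (c, f) := ⟨_, _, rfl⟩
    have hc : c1 = c2 := by
      have h1 := pv_stepB_fst nw cost b b' p
      rw [e1, e2] at h1
      exact h1
    subst hc
    rw [e1, e2]
    exact ih c1 f1 f2

theorem pv_passB (N S : Int) (nw : List Int) (edges : List (Int × Int))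
    (ctx : pvCtx N S nw edges) :
    ∀ (l : List (Int × Int)) (cost : List (Option Int)),
      (∀ p ∈ l, p ∈ edges) → pvCostOK N S nw edges cost →
      pvCostOK N S nw edges (l.foldl (pvStepB nw) (cost, false)).1 ∧
      pvPhi N (l.foldl (pvStepB nw) (cost, false)).1 ≤ pvPhi N cost ∧
      ((l.foldl (pvStepB nw) (cost, false)).2 = true →
        pvPhi N (l.foldl (pvStepB nw) (cost, false)).1 < pvPhi N cost) ∧
      ((l.foldl (pvStepB nw) (cost, false)).2 = false →
        (l.foldl (pvStepB nw) (cost, false)).1 = cost ∧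
        ∀ p ∈ l, ∀ cu, cost.getD p.1.toNat none = some cu →
          ∃ cv, cost.getD p.2.toNat none = some cv ∧ cv ≤ cu + pvw nw p.2) := by
  intro l
  induction l with
  | nil =>
    intro cost _ hok
    exact ⟨hok, le_refl _, by simp, fun _ => ⟨rfl, by simp⟩⟩
  | cons p t ih =>
    intro cost hl hok
    have hpe : p ∈ edges := hl p List.mem_cons_self
    have hpwdef : nw.getD (p.2 - 1).toNat 0 = pvw nw p.2 := rfl
    rw [List.foldl_cons]
    cases hg : cost.getD p.1.toNat none with
    | none =>
      have hstep : pvStepB nw (cost, false) p = (cost, false) := by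
        simp only [pvStepB]; rw [hg]
      rw [hstep]
      obtain ⟨a, b, c, d⟩ := ih cost (fun q hq => hl q (List.mem_cons_of_mem _ hq)) hok
      refine ⟨a, b, c, fun hf => ⟨(d hf).1, ?_⟩⟩
      intro q hq cu hcu
      rcases List.mem_cons.mp hq with rfl | hq
      · rw [hg] at hcu; cases hcu
      · exact (d hf).2 q hq cu hcu
    | some cu =>
      obtain ⟨-, -, hwcu⟩ := hok.ach p.1 cu hg
      have hru : pvReaches S edges p.1 = true := pvWC_reach S edges nw p.1 cu hwcu
      obtain ⟨hv1, hvN, hpw0B, hpwWB⟩ := ctx.hreach p hpe hru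
      have hbcu := hok.bnd _ (pv_mem_of_getD cost p.1.toNat cu hg) cu rfl

      by_cases hlt : pvLtCost (cu + pvw nw p.2) (cost.getD p.2.toNat none) = true
      · have hstep : pvStepB nw (cost, false) p =
            (cost.set p.2.toNat (some (cu + pvw nw p.2)), true) := by
          simp only [pvStepB]
          rw [hg, hpwdef]
          exact if_pos hlt
        rw [hstep]
        have hwcv : pvWC S edges nw p.2 (cu + pvw nw p.2) := pvWC.step hwcu hpe
        have hncK : cu + pvw nw p.2 ≤ ((pvK cost : Int) + 1) * 2147483648 := by
          nlinarith [hbcu.2, hpwWB]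
        obtain ⟨hok', hphi', -⟩ := pv_update_ok N S nw edges ctx cost hok p.2
          (cu + pvw nw p.2) hv1 hvN hwcv (by omega) hncK (by exact hlt)
        have hcind := pv_foldB_fst nw t (cost.set p.2.toNat (some (cu + pvw nw p.2))) true false
        obtain ⟨a, b, -, -⟩ := ih _ (fun q hq => hl q (List.mem_cons_of_mem _ hq)) hok'
        have hflag := pv_flagB_mono nw t (cost.set p.2.toNat (some (cu + pvw nw p.2)))
        refine ⟨by rw [hcind]; exact a, by rw [hcind]; omega, fun _ => by rw [hcind]; omega,
          fun hf => ?_⟩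
        rw [hflag] at hf
        cases hf
      · have hstep : pvStepB nw (cost, false) p = (cost, false) := by
          simp only [pvStepB]
          rw [hg, hpwdef]
          exact if_neg hlt
        rw [hstep]
        rw [Bool.not_eq_true] at hlt
        obtain ⟨cv, hcv, hle⟩ := pvLtCost_false hlt
        obtain ⟨a, b, c, d⟩ := ih cost (fun q hq => hl q (List.mem_cons_of_mem _ hq)) hok
        refine ⟨a, b, c, fun hf => ⟨(d hf).1, ?_⟩⟩
        intro q hq cu' hcu'
        rcases List.mem_cons.mp hq with rfl | hq
        · rw [hg] at hcu'
          injection hcu' with he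
          subst he
          exact ⟨cv, hcv, hle⟩
        · exact (d hf).2 q hq cu' hcu'

theorem pv_runB (N S : Int) (nw : List Int) (edges : List (Int × Int))
    (ctx : pvCtx N S nw edges) :
    ∀ (fuel : Nat) (cost : List (Option Int)),
      pvCostOK N S nw edges cost →
      pvPhi N cost < (fuel : Int) →
      pvCostOK N S nw edges (pvBFLoop nw edges fuel cost) ∧
      pvStable nw edges (pvBFLoop nw edges fuel cost) := by
  intro fuel
  induction fuel with
  | zero =>
    intro cost hok hfuel
    have h0 := pvPhi_nonneg N S nw edges cost (by have := ctx.hS1; have := ctx.hSN; omega) hok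
    exfalso; push_cast at hfuel; omega
  | succ fuel ih =>
    intro cost hok hfuel
    obtain ⟨a, b, c, d⟩ := pv_passB N S nw edges ctx edges cost (fun _ h => h) hok
    show pvCostOK N S nw edges (pvBFLoop nw edges (fuel + 1) cost) ∧ _
    simp only [pvBFLoop, pvRelaxPass]
    cases hflag : (edges.foldl (pvStepB nw) (cost, false)).2 with
    | true =>
      rw [if_pos rfl]
      exact ih _ a (by have := c hflag; push_cast at hfuel ⊢; omega)
    | false =>
      rw [if_neg Bool.false_ne_true]
      obtain ⟨heq, hrel⟩ := d hflag
      rw [heq]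
      refine ⟨hok, ?_⟩
      intro u v he cu hcu
      exact hrel (u, v) he cu hcu

-- ---- the initial state ----

theorem pv_init_getD (N S : Int) (nw : List Int) (h1 : 1 ≤ S) (hSN : S ≤ N) (t : Nat) :
    ((List.replicate (N + 1).toNat (none : Option Int)).set S.toNat
        (some (nw.getD (S - 1).toNat 0))).getD t none
      = if t = S.toNat then some (nw.getD (S - 1).toNat 0) else none := by
  have hS : S.toNat < (N + 1).toNat := by omega
  by_cases ht : t = S.toNat
  · subst ht
    rw [if_pos rfl, pv_getD_set_self _ _ (by rwa [List.length_replicate])]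
  · rw [if_neg ht, pv_getD_set_ne _ _ _ _ (fun he => ht he.symm)]
    simp only [List.getD, List.getElem?_replicate]
    split <;> rfl

theorem pv_init_ok (N S : Int) (nw : List Int) (edges : List (Int × Int))
    (ctx : pvCtx N S nw edges) :
    pvCostOK N S nw edges ((List.replicate (N + 1).toNat (none : Option Int)).set S.toNat
      (some (nw.getD (S - 1).toNat 0))) := by
  have hpwdef : nw.getD (S - 1).toNat 0 = pvw nw S := rfl
  have hgS : ((List.replicate (N + 1).toNat (none : Option Int)).set S.toNat
      (some (nw.getD (S - 1).toNat 0))).getD S.toNat none = some (nw.getD (S - 1).toNat 0) := by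
    rw [pv_init_getD N S nw ctx.hS1 ctx.hSN, if_pos rfl]
  have hK1 : 1 ≤ pvK ((List.replicate (N + 1).toNat (none : Option Int)).set S.toNat
      (some (nw.getD (S - 1).toNat 0))) := by
    have hmem := pv_mem_of_getD _ S.toNat _ hgS
    have : 0 < pvK ((List.replicate (N + 1).toNat (none : Option Int)).set S.toNat
        (some (nw.getD (S - 1).toNat 0))) := List.countP_pos_iff.mpr ⟨_, hmem, rfl⟩
    omega
  have hwSlb := ctx.hwSlb
  have hwWS := ctx.hwWS
  refine ⟨?_, ?_, ?_, ?_, ⟨nw.getD (S - 1).toNat 0, hgS, le_of_eq hpwdef⟩⟩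
  · rw [List.length_set, List.length_replicate]
  · rw [pv_init_getD N S nw ctx.hS1 ctx.hSN, if_neg (by have := ctx.hS1; omega)]
  · intro o ho x hx
    subst hx
    rcases List.mem_or_eq_of_mem_set ho with h | h
    · exact absurd (List.eq_of_mem_replicate h) (by simp)
    · injection h with h'
      subst h'
      rw [hpwdef] at hK1 ⊢
      have hK1i : (1 : Int) ≤ (pvK ((List.replicate (N + 1).toNat none).set S.toNat
          (some (pvw nw S))) : Int) := by exact_mod_cast hK1
      refine ⟨hwSlb, ?_⟩
      nlinarith [hwWS, hK1i]
  · intro v x hx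
    rw [pv_init_getD N S nw ctx.hS1 ctx.hSN] at hx
    split at hx
    · injection hx with h'
      subst h'
      have hvS : v = S := pv_toNat_eq ctx.hS1 (by assumption)
      subst hvS
      rw [hpwdef]
      exact ⟨ctx.hS1, ctx.hSN, pvWC.base⟩
    · cases hx

theorem pv_init_fuel (N S : Int) (nw : List Int) (edges : List (Int × Int))
    (ctx : pvCtx N S nw edges) :
    pvPhi N ((List.replicate (N + 1).toNat (none : Option Int)).set S.toNat
      (some (nw.getD (S - 1).toNat 0))) + 1 + 1 ≤ (pvFuelA N : Int) := by
  have hN1 : 1 ≤ N := le_trans ctx.hS1 ctx.hSN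
  have hS : S.toNat < (N + 1).toNat := by have := ctx.hS1; have := ctx.hSN; omega
  rw [pvPhi_set N _ S.toNat (by rwa [List.length_replicate])]
  have hrep : pvPhi N (List.replicate (N + 1).toNat (none : Option Int)) =
      ((N + 1).toNat : Int) * (N * 2147483648 + 2147483648 + 1) := by
    rw [pvPhi, List.map_replicate, List.sum_replicate]
    simp [pvF]
  have hrg : (List.replicate (N + 1).toNat (none : Option Int)).getD S.toNat none = none := by
    simp only [List.getD, List.getElem?_replicate]
    split <;> rfl
  rw [hrep, hrg]
  have hpwdef : nw.getD (S - 1).toNat 0 = pvw nw S := rfl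
  have h0 := ctx.hwSlb
  have hW := ctx.hwWS
  have hcast : ((N + 1).toNat : Int) = N + 1 := by omega
  rw [hcast]
  unfold pvFuelA
  push_cast
  have hNt : (N.toNat : Int) = N := by omega
  rw [hNt]
  simp only [pvF, hpwdef]
  have hNW : (2147483648 : Int) ≤ N * 2147483648 := by nlinarith [hN1]
  nlinarith [hW, hNW, hN1]

-- ---- the verdict ----

theorem beautiful_path_spec : Claim_equal_beautiful_path := by
  intro N M S D nw edges hdom hpre
  obtain ⟨hS1, hSN, hSlen, hD1, hDN, hsrc, hrch⟩ := hpre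
  have hdomW : ∀ x ∈ nw, -2147483648 ≤ x ∧ x ≤ 2147483648 := by
    simp only [Dom_beautiful_path, Bool.and_eq_true, List.all_eq_true] at hdom
    intro x hx
    have := hdom.1.2 x hx
    simp only [pvDomInt, decide_eq_true_eq] at this
    omega
  have hgetB : ∀ v : Int, 1 ≤ v → (v : Int) ≤ nw.length →
      -2147483648 ≤ nw.getD (v - 1).toNat 0 ∧ nw.getD (v - 1).toNat 0 ≤ 2147483648 := by
    intro v h1 h2
    have hlt : (v - 1).toNat < nw.length := by omega
    rw [List.getD_eq_getElem _ _ hlt]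
    exact hdomW _ (List.getElem_mem hlt)
  have ctx : pvCtx N S nw edges :=
    ⟨hS1, hSN, (hgetB S hS1 hSlen).1, (hgetB S hS1 hSlen).2,
     fun p hp hr => ⟨(hrch p hp hr).1, (hrch p hp hr).2.1, (hrch p hp hr).2.2.2,
       (hgetB p.2 (hrch p hp hr).1 (hrch p hp hr).2.2.1).2⟩⟩
  have hpwdef : nw.getD (S - 1).toNat 0 = pvw nw S := rfl
  have hinitok := pv_init_ok N S nw edges ctx
  have hfuel := pv_init_fuel N S nw edges ctx
  have hgS : ((List.replicate (N + 1).toNat (none : Option Int)).set S.toNat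
      (some (nw.getD (S - 1).toNat 0))).getD S.toNat none = some (nw.getD (S - 1).toNat 0) := by
    rw [pv_init_getD N S nw ctx.hS1 ctx.hSN, if_pos rfl]
  have hpq0 : pvPQInv N S nw edges [(nw.getD (S - 1).toNat 0, S)]
      ((List.replicate (N + 1).toNat (none : Option Int)).set S.toNat
        (some (nw.getD (S - 1).toNat 0))) := by
    intro p hp
    rcases List.mem_singleton.mp hp with rfl
    exact ⟨hS1, hSN, by rw [hpwdef]; exact pvWC.base, _, hgS, le_refl _⟩
  have hpend0 : pvPend N S nw edges [(nw.getD (S - 1).toNat 0, S)]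
      ((List.replicate (N + 1).toNat (none : Option Int)).set S.toNat
        (some (nw.getD (S - 1).toNat 0))) := by
    intro u cu hcu
    rw [pv_init_getD N S nw ctx.hS1 ctx.hSN] at hcu
    split at hcu
    · injection hcu with h'
      subst h'
      right
      have hu : u = S := pv_toNat_eq ctx.hS1 (by assumption)
      subst hu
      exact List.mem_singleton.mpr rfl
    · cases hcu
  have hA := pv_runA N S nw edges
    (edges.foldl (fun d p => d.modify p.1 [] (fun l => l ++ [p.2]))
      ((PySem.List.pyRange 1 (N + 1) 1).foldl (fun d i => d.insert i ([] : List Int)) PySem.Dict.empty))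
    ctx (pv_adj_mem N edges) (pvFuelA N)
    [(nw.getD (S - 1).toNat 0, S)]
    ((List.replicate (N + 1).toNat (none : Option Int)).set S.toNat
      (some (nw.getD (S - 1).toNat 0)))
    hinitok hpq0 hpend0 (by simp only [List.length_singleton]; push_cast; omega)
  have hB := pv_runB N S nw edges ctx (pvFuelA N)
    ((List.replicate (N + 1).toNat (none : Option Int)).set S.toNat
      (some (nw.getD (S - 1).toNat 0)))
    hinitok (by omega)
  have hlist := pv_agree_list N S nw edges _ _ hA.1 hB.1 hA.2 hB.2
  show beautiful_path N M S D nw edges = beautiful_path_alt N M S D nw edges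
  have e1 : beautiful_path N M S D nw edges =
      ((PySem.List.pyGet? (pvDijkstraLoop nw
        (edges.foldl (fun d p => d.modify p.1 [] (fun l => l ++ [p.2]))
          ((PySem.List.pyRange 1 (N + 1) 1).foldl (fun d i => d.insert i ([] : List Int)) PySem.Dict.empty))
        (pvFuelA N) [(nw.getD (S - 1).toNat 0, S)]
        ((List.replicate (N + 1).toNat (none : Option Int)).set S.toNat
          (some (nw.getD (S - 1).toNat 0)))) D).getD none).getD (-1) := rfl
  have e2 : beautiful_path_alt N M S D nw edges =
      ((PySem.List.pyGet? (pvBFLoop nw edges (pvFuelA N)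
        ((List.replicate (N + 1).toNat (none : Option Int)).set S.toNat
          (some (nw.getD (S - 1).toNat 0)))) D).getD none).getD (-1) := rfl
  rw [e1, e2, hlist]
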